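-- pv_equiv track=rewrite | github.com/XtremeAAA/Math-Forest | math bridge.py | sg_validate_input
-- ===== SOURCE A (Python) =====
-- def sg_validate_input(user_input):
--     """Validate the input string to only allow numbers and a single full stop."""
--     if user_input.count(".") != 1:
--         return False
--
--     parts = user_input.split(".")
--     for part in parts:
--         if not part.isdigit():
--             return False
--
--     if len(parts[1]) != 2:
--         return False
--
--     return True
-- ===== SOURCE B (Python) =====
-- def sg_validate_input(user_input):
--     """Validate the input string to only allow numbers and a single full stop.
--
--     Positional format check: <digits>.<dd> — no counting/splitting needed."""
--     return (user_input[-3:-2] == "."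
--             and user_input[:-3].isdigit()
--             and user_input[-2:].isdigit())
-- ===== Notes on version B (the rewrite author's own statement) =====
-- stated objective: simpler
-- what changed: Replaces A's count/split/loop parse with a single positional format check: the character three from the end must be a full stop and the slices before and after it must be digit-only.
import Mathlib
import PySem

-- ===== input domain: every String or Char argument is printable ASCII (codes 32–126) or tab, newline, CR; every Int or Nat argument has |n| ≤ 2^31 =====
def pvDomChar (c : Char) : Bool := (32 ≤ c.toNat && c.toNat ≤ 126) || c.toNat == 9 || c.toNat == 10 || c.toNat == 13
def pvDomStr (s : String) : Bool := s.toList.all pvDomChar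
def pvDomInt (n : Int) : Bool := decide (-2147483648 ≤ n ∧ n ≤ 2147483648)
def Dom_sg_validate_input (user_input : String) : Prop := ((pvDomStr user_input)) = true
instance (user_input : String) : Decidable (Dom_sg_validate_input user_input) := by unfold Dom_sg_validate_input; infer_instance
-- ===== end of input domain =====

-- B replaces A's count/split/loop parse by a single positional format check (simpler; same cost).

-- ===== PORT A =====
-- literal port of A: count('.') != 1 → False; split on '.'; any non-digit part → False; len(parts[1]) != 2 → False; else True
def sg_validate_input (user_input : String) : Bool :=
  if PySem.Chars.count user_input.toList ['.'] != 1 then false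
  else
    if (PySem.Chars.splitOn user_input.toList ['.']).any
        (fun part => !PySem.Chars.strIsdigit part) then false
    else
      match PySem.List.pyGet? (PySem.Chars.splitOn user_input.toList ['.']) 1 with
      | none => false  -- unreachable: count('.') = 1 gives exactly two parts
      | some p1 => if p1.length != 2 then false else true

-- ===== PORT B =====
-- literal port of Source B: user_input[-3:-2] == "." and user_input[:-3].isdigit() and user_input[-2:].isdigit()
def sg_validate_input_alt (user_input : String) : Bool :=
  (PySem.Chars.slice user_input.toList (some (-3)) (some (-2)) == ['.'])
    && PySem.Chars.strIsdigit (PySem.Chars.slice user_input.toList none (some (-3)))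
    && PySem.Chars.strIsdigit (PySem.Chars.slice user_input.toList (some (-2)) none)

-- ===== PRECONDITION & SPEC =====
def Spec_sg_validate_input (user_input : String) (out : Bool) : Prop := out = sg_validate_input_alt user_input
instance (user_input : String) (out : Bool) : Decidable (Spec_sg_validate_input user_input out) := by unfold Spec_sg_validate_input; infer_instance

-- ===== CLAIM (what is proved, stated in full; the proofs are below) =====
def Claim_equal_sg_validate_input : Prop := ∀ (user_input : String), Dom_sg_validate_input user_input → Spec_sg_validate_input user_input (sg_validate_input user_input)

-- ===== LEMMAS AND PROOFS =====

-- the common characterisation: cs is <nonempty digits> '.' <digit> <digit>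
def pvGood (cs : List Char) : Prop :=
  ∃ I a b, cs = I ++ '.' :: [a, b] ∧ PySem.Chars.strIsdigit I = true
    ∧ PySem.Chars.isdigit a = true ∧ PySem.Chars.isdigit b = true

theorem pv_isdigit_ne_dot {c : Char} (h : PySem.Chars.isdigit c = true) : c ≠ '.' := by
  simp [PySem.Chars.isdigit] at h
  rintro rfl
  exact absurd h.1 (by decide)

-- step equations for the fuel-based helpers, specialised to sep = ['.']
theorem pv_cg_zero (l : List Char) (acc : Nat) :
    PySem.Chars.count.go ['.'] 0 l acc = acc := by cases l <;> rfl

theorem pv_cg_nil (f acc : Nat) : PySem.Chars.count.go ['.'] f [] acc = acc := by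
  cases f <;> rfl

theorem pv_cg_cons (n : Nat) (h : Char) (t : List Char) (acc : Nat) :
    PySem.Chars.count.go ['.'] (n + 1) (h :: t) acc
      = if h = '.' then PySem.Chars.count.go ['.'] n t (acc + 1)
        else PySem.Chars.count.go ['.'] n t acc := by
  show (if (['.'] : List Char).isPrefixOf (h :: t) = true
        then PySem.Chars.count.go ['.'] n (List.drop (['.'] : List Char).length (h :: t)) (acc + 1)
        else PySem.Chars.count.go ['.'] n t acc) = _
  by_cases hd : h = '.'
  · subst hd; rw [if_pos (by simp [List.isPrefixOf]), if_pos rfl]; rfl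
  · rw [if_neg (by simp [List.isPrefixOf]; exact fun e => hd e.symm), if_neg hd]

theorem pv_sg_zero (l cur : List Char) (acc : List (List Char)) :
    PySem.Chars.splitOn.go ['.'] 0 l cur acc = ((cur.reverse ++ l) :: acc).reverse := by
  cases l <;> rfl

theorem pv_sg_nil (n : Nat) (cur : List Char) (acc : List (List Char)) :
    PySem.Chars.splitOn.go ['.'] (n + 1) [] cur acc = (cur.reverse :: acc).reverse := rfl

theorem pv_sg_cons (n : Nat) (h : Char) (t cur : List Char) (acc : List (List Char)) :
    PySem.Chars.splitOn.go ['.'] (n + 1) (h :: t) cur acc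
      = if h = '.' then PySem.Chars.splitOn.go ['.'] n t [] (cur.reverse :: acc)
        else PySem.Chars.splitOn.go ['.'] n t (h :: cur) acc := by
  show (if (['.'] : List Char).isPrefixOf (h :: t) = true
        then PySem.Chars.splitOn.go ['.'] n (List.drop (['.'] : List Char).length (h :: t)) [] (cur.reverse :: acc)
        else PySem.Chars.splitOn.go ['.'] n t (h :: cur) acc) = _
  by_cases hd : h = '.'
  · subst hd; rw [if_pos (by simp [List.isPrefixOf]), if_pos rfl]; rfl
  · rw [if_neg (by simp [List.isPrefixOf]; exact fun e => hd e.symm), if_neg hd]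

theorem pv_count_go_eq (l : List Char) (acc fuel : Nat) (hf : l.length ≤ fuel) :
    PySem.Chars.count.go ['.'] fuel l acc = acc + l.count '.' := by
  induction fuel generalizing l acc with
  | zero =>
    have hl : l = [] := List.length_eq_zero_iff.mp (Nat.le_zero.mp hf)
    subst hl; simp [pv_cg_zero]
  | succ n ih =>
    cases l with
    | nil => simp [pv_cg_nil]
    | cons h t =>
      rw [pv_cg_cons]
      have ht : t.length ≤ n := by simpa using hf
      by_cases hd : h = '.'
      · rw [if_pos hd, ih t (acc + 1) ht]
        simp [hd]; omega
      · rw [if_neg hd, ih t acc ht]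
        simp [hd]

theorem pv_count_eq (cs : List Char) : PySem.Chars.count cs ['.'] = cs.count '.' := by
  simpa [PySem.Chars.count] using pv_count_go_eq cs 0 cs.length le_rfl

theorem pv_count_one_iff (cs : List Char) :
    cs.count '.' = 1 ↔ ∃ I F, cs = I ++ '.' :: F ∧ '.' ∉ I ∧ '.' ∉ F := by
  constructor
  · intro h
    induction cs with
    | nil => simp at h
    | cons c t ih =>
      by_cases hc : c = '.'
      · subst hc
        refine ⟨[], t, rfl, by simp, ?_⟩
        rw [List.count_cons_self] at h
        have : t.count '.' = 0 := by omega
        simpa [List.count_eq_zero] using this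
      · rw [List.count_cons_of_ne hc] at h
        obtain ⟨I, F, rfl, hI, hF⟩ := ih h
        exact ⟨c :: I, F, rfl, by simp [hI]; exact fun e => hc e.symm, hF⟩
  · rintro ⟨I, F, rfl, hI, hF⟩
    simp [List.count_append, List.count_eq_zero.mpr hI, List.count_eq_zero.mpr hF]

theorem pv_splitOn_go_nodot (l cur : List Char) (acc : List (List Char)) (fuel : Nat)
    (hl : '.' ∉ l) :
    PySem.Chars.splitOn.go ['.'] fuel l cur acc = ((cur.reverse ++ l) :: acc).reverse := by
  induction fuel generalizing l cur with
  | zero => exact pv_sg_zero l cur acc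
  | succ n ih =>
    cases l with
    | nil => simp [pv_sg_nil]
    | cons h t =>
      have hh : h ≠ '.' := fun e => hl (by simp [e])
      rw [pv_sg_cons, if_neg hh, ih t (h :: cur) (fun m => hl (by simp [m]))]
      simp

theorem pv_splitOn_go_main (I F cur : List Char) (acc : List (List Char)) (fuel : Nat)
    (hI : '.' ∉ I) (hF : '.' ∉ F) (hf : I.length + 1 ≤ fuel) :
    PySem.Chars.splitOn.go ['.'] fuel (I ++ '.' :: F) cur acc
      = acc.reverse ++ [cur.reverse ++ I, F] := by
  induction I generalizing cur fuel with
  | nil =>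
    cases fuel with
    | zero => simp at hf
    | succ n =>
      rw [List.nil_append, pv_sg_cons, if_pos rfl, pv_splitOn_go_nodot F [] _ n hF]
      simp
  | cons c t ih =>
    cases fuel with
    | zero => simp at hf
    | succ n =>
      have hc : c ≠ '.' := fun e => hI (by simp [e])
      rw [List.cons_append, pv_sg_cons, if_neg hc,
        ih (c :: cur) n (fun m => hI (List.mem_cons_of_mem c m)) (by simp at hf ⊢; omega)]
      simp

theorem pv_splitOn_eq (I F : List Char) (hI : '.' ∉ I) (hF : '.' ∉ F) :
    PySem.Chars.splitOn (I ++ '.' :: F) ['.'] = [I, F] := by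
  unfold PySem.Chars.splitOn
  rw [pv_splitOn_go_main I F [] [] _ hI hF (by simp)]
  simp

theorem pv_strIsdigit_no_dot {l : List Char} (h : PySem.Chars.strIsdigit l = true) : '.' ∉ l := by
  simp [PySem.Chars.strIsdigit, List.all_eq_true] at h
  intro hm
  exact pv_isdigit_ne_dot (h.2 _ hm) rfl

theorem pv_A_iff (s : String) : sg_validate_input s = true ↔ pvGood s.toList := by
  constructor
  · intro h
    unfold sg_validate_input at h
    rw [pv_count_eq] at h
    by_cases hc : s.toList.count '.' = 1
    · obtain ⟨I, F, hsplit, hI, hF⟩ := (pv_count_one_iff _).mp hc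
      rw [hsplit] at h ⊢
      rw [if_neg (by simp [hsplit ▸ hc])] at h
      rw [pv_splitOn_eq I F hI hF] at h
      by_cases hany : (([I, F] : List (List Char)).any fun part => !PySem.Chars.strIsdigit part) = true
      · rw [if_pos hany] at h
        exact absurd h (by simp)
      · rw [if_neg hany] at h
        simp only [List.any_cons, List.any_nil, Bool.or_false, Bool.or_eq_true,
          Bool.not_eq_eq_eq_not, Bool.not_true, not_or] at hany
        obtain ⟨h1, h2⟩ := hany
        have hI2 : PySem.Chars.strIsdigit I = true := by
          cases hI3 : PySem.Chars.strIsdigit I with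
          | false => exact absurd hI3 h1
          | true => rfl
        have hF2 : PySem.Chars.strIsdigit F = true := by
          cases hF3 : PySem.Chars.strIsdigit F with
          | false => exact absurd hF3 h2
          | true => rfl
        simp only [PySem.List.pyGet?, PySem.List.pyIdx?] at h
        norm_num at h
        match F, h with
        | [a, b], h =>
          exact ⟨I, a, b, rfl, hI2, by
            simp [PySem.Chars.strIsdigit] at hF2; exact hF2.1, by
            simp [PySem.Chars.strIsdigit] at hF2; exact hF2.2⟩
    · rw [if_pos (by simpa using hc)] at h
      exact absurd h (by simp)
  · rintro ⟨I, a, b, hs, hI, ha, hb⟩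
    have hF : PySem.Chars.strIsdigit [a, b] = true := by
      simp [PySem.Chars.strIsdigit, ha, hb]
    have hInd : '.' ∉ I := pv_strIsdigit_no_dot hI
    have hFnd : '.' ∉ ([a, b] : List Char) := pv_strIsdigit_no_dot hF
    unfold sg_validate_input
    rw [hs, pv_count_eq]
    rw [if_neg (by simp [(pv_count_one_iff _).mpr ⟨I, [a, b], rfl, hInd, hFnd⟩])]
    rw [pv_splitOn_eq I [a, b] hInd hFnd]
    rw [if_neg (by simp [hI, hF])]
    simp [PySem.List.pyGet?, PySem.List.pyIdx?]

theorem pv_slice_mid (cs : List Char) :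
    PySem.List.slice cs (some (-3)) (some (-2))
      = List.take ((cs.length - 2) - (cs.length - 3)) (List.drop (cs.length - 3) cs) := by
  simp only [PySem.List.slice]
  rw [PySem.List.clampIdx_neg_ofNat cs.length 3 (by norm_num),
    PySem.List.clampIdx_neg_ofNat cs.length 2 (by norm_num)]

theorem pv_B_iff (s : String) : sg_validate_input_alt s = true ↔ pvGood s.toList := by
  unfold sg_validate_input_alt
  rw [Bool.and_eq_true, Bool.and_eq_true]
  simp only [PySem.Chars.slice_eq_listSlice, beq_iff_eq]
  rw [pv_slice_mid, PySem.List.slice_to_neg_ofNat s.toList 3 (by norm_num),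
    PySem.List.slice_from_neg_ofNat s.toList 2 (by norm_num)]
  constructor
  · rintro ⟨⟨h1, h2⟩, h3⟩
    have hne : List.take (s.toList.length - 3) s.toList ≠ [] := by
      intro e
      rw [e] at h2
      exact absurd h2 (by simp [PySem.Chars.strIsdigit])
    have hn4 : 4 ≤ s.toList.length := by
      by_contra hlt
      apply hne
      rw [List.take_eq_nil_iff]
      left; omega
    have hd1 : (s.toList.length - 2) - (s.toList.length - 3) = 1 := by omega
    rw [hd1] at h1
    have hdrop2 : List.drop (s.toList.length - 2) s.toList
        = List.drop 1 (List.drop (s.toList.length - 3) s.toList) := by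
      rw [List.drop_drop]
      congr 1
      omega
    have hrest : List.drop (s.toList.length - 3) s.toList
        = '.' :: List.drop (s.toList.length - 2) s.toList := by
      conv_lhs => rw [← List.take_append_drop 1 (List.drop (s.toList.length - 3) s.toList)]
      rw [h1, hdrop2]
      rfl
    have hlen2 : (List.drop (s.toList.length - 2) s.toList).length = 2 := by
      rw [List.length_drop]; omega
    match hF : List.drop (s.toList.length - 2) s.toList, hlen2 with
    | [a, b], _ =>
      rw [hF] at hrest h3
      refine ⟨List.take (s.toList.length - 3) s.toList, a, b, ?_, h2, ?_, ?_⟩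
      · conv_lhs => rw [← List.take_append_drop (s.toList.length - 3) s.toList]
        rw [hrest]
      · simp [PySem.Chars.strIsdigit] at h3
        exact h3.1
      · simp [PySem.Chars.strIsdigit] at h3
        exact h3.2
  · rintro ⟨I, a, b, hs, hI, ha, hb⟩
    rw [hs]
    have hlen : (I ++ '.' :: [a, b]).length = I.length + 3 := by simp
    rw [hlen]
    have e3 : I.length + 3 - 3 = I.length := by omega
    have e2 : I.length + 3 - 2 = I.length + 1 := by omega
    rw [e3, e2]
    have ed : I.length + 1 - I.length = 1 := by omega
    rw [ed]
    refine ⟨⟨?_, ?_⟩, ?_⟩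
    · rw [List.drop_left]
      rfl
    · rw [List.take_left]
      exact hI
    · have hdd : List.drop (I.length + 1) (I ++ '.' :: [a, b])
          = List.drop 1 (List.drop I.length (I ++ '.' :: [a, b])) := by
        rw [List.drop_drop]
      rw [hdd, List.drop_left]
      simp [PySem.Chars.strIsdigit, ha, hb]

theorem sg_validate_input_spec : Claim_equal_sg_validate_input := by
  intro s _
  unfold Spec_sg_validate_input
  cases hA : sg_validate_input s with
  | true => exact ((pv_B_iff s).mpr ((pv_A_iff s).mp hA)).symm
  | false =>
    cases hB : sg_validate_input_alt s with
    | false => rfl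
    | true => exact absurd ((pv_A_iff s).mpr ((pv_B_iff s).mp hB)) (by simp [hA])
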